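-- pv_equiv track=rewrite | github.com/WayneLin92/AlgTop | algebras/BU.py | virschiebung
-- ===== SOURCE A (Python) =====
-- def virschiebung(m):
--     """
--     Return the Virschiebung of the monomial.
--     Return None if it is zero
--     """
--     if len(m) % 2 == 0:
--         return None
--     else:
--         result = [0] * ((len(m) + 1) // 2)
--     for i in range(len(m)):
--         if i % 2 == 1:
--             if m[i] != 0:
--                 return None
--         else:
--             result[i // 2] = m[i]
--     return tuple(result)
-- ===== SOURCE B (Python) =====
-- def virschiebung(m):
--     """
--     Return the Virschiebung of the monomial.
--     Return None if it is zero
--     """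
--     if len(m) % 2 == 0:
--         return None
--
--     def go(rest):
--         # rest always has odd length here
--         if len(rest) == 1:
--             return [rest[0]]
--         if rest[1] != 0:
--             return None
--         sub = go(rest[2:])
--         return None if sub is None else [rest[0]] + sub
--
--     r = go(list(m))
--     return None if r is None else tuple(r)
-- ===== Notes on version B (the rewrite author's own statement) =====
-- stated objective: alternative
-- what changed: Replaces A's index loop over a preallocated result list with an i%2 branch by a structural recursion that consumes the monomial two entries at a time, building the output on the way back.
import Mathlib
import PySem

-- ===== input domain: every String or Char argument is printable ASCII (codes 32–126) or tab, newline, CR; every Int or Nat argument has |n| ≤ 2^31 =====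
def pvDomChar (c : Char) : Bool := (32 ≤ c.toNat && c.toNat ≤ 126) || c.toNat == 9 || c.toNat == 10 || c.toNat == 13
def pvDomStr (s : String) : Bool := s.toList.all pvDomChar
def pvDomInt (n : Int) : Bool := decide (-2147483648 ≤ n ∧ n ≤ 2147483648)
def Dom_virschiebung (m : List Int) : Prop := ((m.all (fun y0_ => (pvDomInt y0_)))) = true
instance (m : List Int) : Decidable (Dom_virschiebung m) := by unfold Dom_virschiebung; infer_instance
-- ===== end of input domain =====

-- B replaces A's index loop over a preallocated result (with an i%2 branch) by a
-- structural recursion consuming the list two entries at a time (objective: alternative decomposition).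

-- ===== PORT A =====
-- the `for i in range(len(m))` loop with its early `return None`
def vLoop (m : List Int) (i : Nat) (result : List Int) : Option (List Int) :=
  if h : i < m.length then
    if i % 2 = 1 then
      if m[i] ≠ 0 then none
      else vLoop m (i + 1) result
    else vLoop m (i + 1) (result.set (i / 2) m[i])
  else some result
termination_by m.length - i

def virschiebung (m : List Int) : Option (List Int) :=
  if m.length % 2 = 0 then none
  else vLoop m 0 (List.replicate ((m.length + 1) / 2) 0)

-- ===== PORT B =====
-- Source B's inner `go`: recursion two entries at a time; `go` is only reached on
-- odd-length lists, so the `[]` case is unreachable (Python would raise there)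
def vGo : List Int → Option (List Int)
  | [] => some []
  | [e] => some [e]
  | e :: o :: rest => if o ≠ 0 then none else (vGo rest).map (e :: ·)

def virschiebung_alt (m : List Int) : Option (List Int) :=
  if m.length % 2 = 0 then none
  else vGo m

-- ===== PRECONDITION & SPEC =====
def Spec_virschiebung (m : List Int) (out : Option (List Int)) : Prop := out = virschiebung_alt m
instance (m : List Int) (out : Option (List Int)) : Decidable (Spec_virschiebung m out) := by unfold Spec_virschiebung; infer_instance

-- ===== CLAIM (what is proved, stated in full; the proofs are below) =====
def Claim_equal_virschiebung : Prop := ∀ (m : List Int), Dom_virschiebung m → Spec_virschiebung m (virschiebung m)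

-- ===== LEMMAS AND PROOFS =====

theorem take_succ_set (l : List Int) (p : Nat) (v : Int) (h : p < l.length) :
    (l.set p v).take (p + 1) = l.take p ++ [v] := by
  rw [List.set_eq_take_append_cons_drop, if_pos h, List.take_append]
  simp [List.length_take, Nat.min_eq_left (Nat.le_of_lt h)]

theorem vLoop_go (m : List Int) (i : Nat) (result : List Int)
    (he : i % 2 = 0) (hlt : i < m.length) (hod : (m.length - i) % 2 = 1)
    (hlen : result.length = i / 2 + (m.length - i + 1) / 2) :
    vLoop m i result = (vGo (m.drop i)).map (fun s => result.take (i / 2) ++ s) := by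
  rw [vLoop]
  rw [dif_pos hlt, if_neg (by omega)]
  by_cases h1 : i + 1 < m.length
  · -- at least two entries remain
    have hdrop : m.drop i = m[i] :: m[i+1]'h1 :: m.drop (i + 2) := by
      rw [List.drop_eq_getElem_cons hlt, List.drop_eq_getElem_cons h1]
    rw [vLoop, dif_pos h1, if_pos (by omega)]
    by_cases h0 : m[i+1]'h1 ≠ 0
    · rw [if_pos h0, hdrop]
      simp [vGo, h0]
    · rw [if_neg h0]
      push Not at h0
      have hlt2 : i + 2 < m.length := by omega
      have ih := vLoop_go m (i + 2) (result.set (i / 2) m[i])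
        (by omega) hlt2 (by omega)
        (by simp [List.length_set, hlen]; omega)
      rw [ih, hdrop]
      have htake : (result.set (i / 2) m[i]).take ((i + 2) / 2)
          = result.take (i / 2) ++ [m[i]] := by
        have : (i + 2) / 2 = i / 2 + 1 := by omega
        rw [this, take_succ_set]
        omega
      simp only [vGo, h0, if_neg (by simp : ¬ (0:Int) ≠ 0), htake]
      cases vGo (m.drop (i + 2)) <;> simp
  · -- last entry: i + 1 = m.length
    have hlast : m.length = i + 1 := by omega
    have hdrop : m.drop i = [m[i]] := by
      rw [List.drop_eq_getElem_cons hlt]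
      have : m.drop (i + 1) = [] := by
        apply List.drop_eq_nil_of_le; omega
      rw [this]
    rw [vLoop, dif_neg (by omega)]
    rw [hdrop]
    have hres : result.set (i / 2) m[i] = result.take (i / 2) ++ [m[i]] := by
      have hl : result.length = i / 2 + 1 := by omega
      have h2 : (result.set (i / 2) m[i]).take (i / 2 + 1) = result.take (i / 2) ++ [m[i]] :=
        take_succ_set _ _ _ (by omega)
      rw [← h2, List.take_of_length_le (by simp [hl])]
    simp [vGo, hres]
termination_by m.length - i

-- ===== VERDICT (by name: the statement is the Claim_ definition above) =====
theorem virschiebung_spec : Claim_equal_virschiebung := by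
  intro m _
  unfold Spec_virschiebung virschiebung virschiebung_alt
  by_cases h : m.length % 2 = 0
  · simp [h]
  · rw [if_neg h, if_neg h]
    have h0 : 0 < m.length := by omega
    rw [vLoop_go m 0 _ (by omega) h0 (by omega) (by simp)]
    simp
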